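-- pv_equiv track=rewrite | github.com/nalwayv/bitesofpy | bite_90/bite_90.py | cleanup_csv_text
-- ===== SOURCE A (Python) =====
-- def cleanup_csv_text(content: str) -> list:
--     lines = content.splitlines()
--     start = 1
--     n = len(lines)
--     p1 = 1
--     clusters = [lines[0]]
--
--     while start < n:
--         p2 = p1
--         ll = []
--         while p2 < n:
--             if len(lines[p2]) == 1:  # line with single "
--                 break
--             ll.append(lines[p2])
--             p2 += 1
--
--         start = p1
--         if ll:
--             if start == 0:
--                 clusters.append(''.join(ll))
--             clusters.append(''.join(ll) + '"')
--         p1 = p2 + 1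
--
--     return clusters
-- ===== SOURCE B (Python) =====
-- def cleanup_csv_text(content: str) -> list:
--     lines = content.splitlines()
--     clusters = [lines[0]]
--     buffer = []
--     for line in lines[1:]:
--         if len(line) == 1:
--             if buffer:
--                 clusters.append(''.join(buffer) + '"')
--                 buffer = []
--         else:
--             buffer.append(line)
--     if buffer:
--         clusters.append(''.join(buffer) + '"')
--     return clusters
-- ===== Notes on version B (the rewrite author's own statement) =====
-- stated objective: simpler
-- what changed: Replaced the stale-cursor nested while-loops over indices (start/p1/p2 bookkeeping, dead start==0 branch) by a single for-loop over lines[1:] with a buffer that is flushed at each single-character delimiter line and once at the end.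
import Mathlib
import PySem

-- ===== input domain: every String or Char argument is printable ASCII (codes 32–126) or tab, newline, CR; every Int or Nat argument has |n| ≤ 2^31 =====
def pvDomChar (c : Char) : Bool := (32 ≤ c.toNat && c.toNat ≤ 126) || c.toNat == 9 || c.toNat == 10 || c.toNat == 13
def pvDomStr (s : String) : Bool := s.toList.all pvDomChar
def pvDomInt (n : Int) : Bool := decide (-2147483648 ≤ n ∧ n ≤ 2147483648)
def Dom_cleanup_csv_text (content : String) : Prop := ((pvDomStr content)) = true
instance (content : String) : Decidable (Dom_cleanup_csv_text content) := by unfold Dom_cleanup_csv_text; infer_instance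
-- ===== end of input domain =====

-- B replaces A's stale-cursor nested while-loops over indices by a single linear pass with a
-- flush buffer (objective: simpler). Return-value equivalence only; neither mutates its argument.

-- ===== PORT A =====
-- inner `while p2 < n:` loop: returns (final p2, ll)
def pvInnerA (lines : List String) (n p2 : Nat) : Nat × List String :=
  if _h : p2 < n then
    if PySem.Str.len (lines.getD p2 "") == 1 then (p2, [])
    else
      let r := pvInnerA lines n (p2 + 1)
      (r.1, lines.getD p2 "" :: r.2)
  else (p2, [])
termination_by n - p2

theorem pvInnerA_ge (lines : List String) (n p2 : Nat) : p2 ≤ (pvInnerA lines n p2).1 := by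
  unfold pvInnerA
  split
  · split
    · exact le_refl _
    · have := pvInnerA_ge lines n (p2 + 1)
      simp only []
      omega
  · exact le_refl _
termination_by n - p2

-- outer `while start < n:` loop; h carries 1 ≤ start ≤ p1 (true from the initial call on)
def pvOuterA (lines : List String) (n start p1 : Nat) (clusters : List String)
    (h : 1 ≤ start ∧ start ≤ p1) : List String :=
  if _hlt : start < n then
    pvOuterA lines n p1 ((pvInnerA lines n p1).1 + 1)
      (if (pvInnerA lines n p1).2 ≠ [] then
        (if p1 == 0 then clusters ++ [PySem.Str.join "" (pvInnerA lines n p1).2] else clusters)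
          ++ [PySem.Str.join "" (pvInnerA lines n p1).2 ++ "\""]
      else clusters)
      ⟨by omega, by have := pvInnerA_ge lines n p1; omega⟩
  else clusters
termination_by (n - start) + (n - p1)
decreasing_by
  have := pvInnerA_ge lines n p1
  omega

-- lines[0] → getD 0 ""; Python raises IndexError when lines = [] (content = ""), excluded by Pre_
def cleanup_csv_text (content : String) : List String :=
  let lines := PySem.Str.splitlines content
  let n := lines.length
  pvOuterA lines n 1 1 [lines.getD 0 ""] ⟨le_refl 1, le_refl 1⟩

-- ===== PORT B =====
-- the `for line in lines[1:]` loop with its trailing flush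
def pvLoopB (rest clusters buffer : List String) : List String :=
  match rest with
  | [] => if buffer ≠ [] then clusters ++ [PySem.Str.join "" buffer ++ "\""] else clusters
  | line :: rest' =>
    if PySem.Str.len line == 1 then
      if buffer ≠ [] then pvLoopB rest' (clusters ++ [PySem.Str.join "" buffer ++ "\""]) []
      else pvLoopB rest' clusters []
    else pvLoopB rest' clusters (buffer ++ [line])

-- lines[1:] → PySem.List.slice; lines[0] → getD 0 "" (IndexError on "" excluded by Pre_)
def cleanup_csv_text_alt (content : String) : List String :=
  let lines := PySem.Str.splitlines content
  pvLoopB (PySem.List.slice lines (some 1) none) [lines.getD 0 ""] []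

-- ===== PRECONDITION & SPEC =====
-- Pre_ excludes only content = "": there splitlines() = [] and Python A (and B) raise IndexError on lines[0].
def Pre_cleanup_csv_text (content : String) : Prop := content ≠ ""
instance (content : String) : Decidable (Pre_cleanup_csv_text content) := by
  unfold Pre_cleanup_csv_text; infer_instance
def pvWitness_cleanup_csv_text : String := ("a,\"b\nc\"")

def Spec_cleanup_csv_text (content : String) (out : List String) : Prop := out = cleanup_csv_text_alt content
instance (content : String) (out : List String) : Decidable (Spec_cleanup_csv_text content out) := by unfold Spec_cleanup_csv_text; infer_instance

-- ===== CLAIM (what is proved, stated in full; the proofs are below) =====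
def Claim_equal_cleanup_csv_text : Prop := ∀ (content : String), Dom_cleanup_csv_text content → Pre_cleanup_csv_text content → Spec_cleanup_csv_text content (cleanup_csv_text content)

-- ===== LEMMAS AND PROOFS =====

-- the segment predicate: lines that are NOT a single-character delimiter line
def pvKeep (l : String) : Bool := !(PySem.Str.len l == 1)

def pvFlush (b : List String) : List String :=
  if b ≠ [] then [PySem.Str.join "" b ++ "\""] else []

theorem drop_length_takeWhile {α : Type} (p : α → Bool) (s : List α) :
    s.drop (s.takeWhile p).length = s.dropWhile p := by
  induction s with
  | nil => simp
  | cons a t ih =>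
    by_cases hp : p a = true
    · simp [hp, ih]
    · simp [hp]

theorem pvInnerA_char (lines : List String) (p1 : Nat) :
    pvInnerA lines lines.length p1 =
      (p1 + ((lines.drop p1).takeWhile pvKeep).length, (lines.drop p1).takeWhile pvKeep) := by
  unfold pvInnerA
  split
  · rename_i hlt
    have hdrop : lines.drop p1 = lines[p1] :: lines.drop (p1 + 1) :=
      List.drop_eq_getElem_cons hlt
    have hget : lines.getD p1 "" = lines[p1] := by
      simp [List.getD_eq_getElem?_getD, List.getElem?_eq_getElem hlt]
    by_cases hone : (PySem.Str.len lines[p1] == 1) = true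
    · have hk : pvKeep lines[p1] = false := by
        simp only [pvKeep, hone, Bool.not_true]
      rw [hget]
      rw [if_pos hone, hdrop, List.takeWhile_cons, hk]
      simp
    · have hone' : (PySem.Str.len lines[p1] == 1) = false := by
        revert hone; cases (PySem.Str.len lines[p1] == 1) <;> simp
      have hk : pvKeep lines[p1] = true := by
        simp only [pvKeep, hone', Bool.not_false]
      have ih := pvInnerA_char lines (p1 + 1)
      rw [hget, if_neg hone, ih, hdrop, List.takeWhile_cons, hk, if_pos rfl]
      simp
      omega
  · rename_i hge
    have : lines.drop p1 = [] := List.drop_eq_nil_of_le (by omega)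
    simp [this]
termination_by lines.length - p1

theorem pvLoopB_buf (s : List String) : ∀ c buf,
    pvLoopB s c buf =
      pvLoopB ((s.dropWhile pvKeep).drop 1) (c ++ pvFlush (buf ++ s.takeWhile pvKeep)) [] := by
  induction s with
  | nil =>
    intro c buf
    simp [pvLoopB, pvFlush]
    by_cases hb : buf = [] <;> simp [hb]
  | cons line rest ih =>
    intro c buf
    by_cases hone : (PySem.Str.len line == 1) = true
    · have hk : pvKeep line = false := by simp only [pvKeep, hone, Bool.not_true]
      simp only [pvLoopB, hone, if_true, List.dropWhile_cons, hk, List.takeWhile_cons,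
        Bool.false_eq_true, if_false, List.drop_succ_cons, List.drop_zero]
      by_cases hb : buf = [] <;> simp [hb, pvFlush]
    · have hone' : (PySem.Str.len line == 1) = false := by
        revert hone; cases (PySem.Str.len line == 1) <;> simp
      have hk : pvKeep line = true := by simp only [pvKeep, hone', Bool.not_false]
      simp only [pvLoopB, hone', Bool.false_eq_true, if_false, List.dropWhile_cons, hk,
        List.takeWhile_cons, if_true]
      rw [ih]
      simp

theorem pvOuterA_eq (lines : List String) : ∀ start p1 clusters h,
    pvOuterA lines lines.length start p1 clusters h =
      if start < lines.length then pvLoopB (lines.drop p1) clusters [] else clusters := by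
  intro start p1 clusters h
  unfold pvOuterA
  split
  · rename_i hlt
    have hge := pvInnerA_ge lines lines.length p1
    have hchar := pvInnerA_char lines p1
    set s := lines.drop p1 with hs
    set t := s.takeWhile pvKeep with ht
    have hp1 : (p1 == 0) = false := by
      have := h.1; have := h.2; simp; omega
    have hdw : lines.drop ((pvInnerA lines lines.length p1).1 + 1)
        = (s.dropWhile pvKeep).drop 1 := by
      rw [hchar]
      conv_rhs => rw [← drop_length_takeWhile pvKeep s, ← ht, hs]
      rw [List.drop_drop, List.drop_drop]
      congr 1
    have hcl : (if (pvInnerA lines lines.length p1).2 ≠ [] then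
          (if p1 == 0 then clusters ++ [PySem.Str.join "" (pvInnerA lines lines.length p1).2]
            else clusters) ++ [PySem.Str.join "" (pvInnerA lines lines.length p1).2 ++ "\""]
          else clusters) = clusters ++ pvFlush t := by
      rw [hchar]; simp only [hp1, Bool.false_eq_true, if_false]
      by_cases hnil : t = [] <;> simp [hnil, pvFlush]
    rw [pvOuterA_eq lines p1 ((pvInnerA lines lines.length p1).1 + 1)]
    rw [hcl, hdw]
    by_cases hp1n : p1 < lines.length
    · rw [if_pos hp1n]
      conv_rhs => rw [pvLoopB_buf]
      simp only [List.nil_append, ← ht, List.drop_one]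
    · rw [if_neg hp1n]
      have hsnil : s = [] := List.drop_eq_nil_of_le (by omega)
      have htnil : t = [] := by rw [ht, hsnil]; rfl
      simp [hsnil, htnil, pvLoopB, pvFlush]
  · rfl
termination_by start p1 => (lines.length - start) + (lines.length - p1)
decreasing_by
  have := pvInnerA_ge lines lines.length p1
  have := h.2
  omega

-- ===== VERDICT (by name: the statement is the Claim_ definition above) =====
theorem cleanup_csv_text_spec : Claim_equal_cleanup_csv_text := by
  intro content _hdom _hpre
  unfold Spec_cleanup_csv_text cleanup_csv_text cleanup_csv_text_alt
  simp only []
  set lines := PySem.Str.splitlines content with hl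
  rw [pvOuterA_eq]
  have hslice : PySem.List.slice lines (some 1) none = lines.drop 1 := by
    simp [PySem.List.slice_from]
  rw [hslice]
  by_cases hn : 1 < lines.length
  · rw [if_pos hn]
  · rw [if_neg hn]
    have : lines.drop 1 = [] := List.drop_eq_nil_of_le (by omega)
    simp [this, pvLoopB]
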